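-- pv_equiv track=rewrite | github.com/erichrichards/advent-of-code | 2020/code06.py | countResponses
-- ===== SOURCE A (Python) =====
-- import string
--
-- def countResponses(groups):
-- 	totalCount = 0
-- 	for group in groups:
-- 		letterCount = 0
-- 		for letter in string.ascii_lowercase:
-- 			if letter in group:
-- 				letterCount = letterCount + 1
-- 		totalCount = totalCount + letterCount
-- 	return totalCount
-- ===== SOURCE B (Python) =====
-- import string
--
-- _LOWER = set(string.ascii_lowercase)
--
-- def countResponses(groups):
--     return sum(len(set(group) & _LOWER) for group in groups)
-- ===== Notes on version B (the rewrite author's own statement) =====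
-- stated objective: idiomatic
-- what changed: Instead of scanning the fixed 26-letter alphabet and running a substring search in the group for each letter, B builds the set of each group's own characters once, intersects it with the lowercase-letter set, and sums the intersection sizes.
import Mathlib
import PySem

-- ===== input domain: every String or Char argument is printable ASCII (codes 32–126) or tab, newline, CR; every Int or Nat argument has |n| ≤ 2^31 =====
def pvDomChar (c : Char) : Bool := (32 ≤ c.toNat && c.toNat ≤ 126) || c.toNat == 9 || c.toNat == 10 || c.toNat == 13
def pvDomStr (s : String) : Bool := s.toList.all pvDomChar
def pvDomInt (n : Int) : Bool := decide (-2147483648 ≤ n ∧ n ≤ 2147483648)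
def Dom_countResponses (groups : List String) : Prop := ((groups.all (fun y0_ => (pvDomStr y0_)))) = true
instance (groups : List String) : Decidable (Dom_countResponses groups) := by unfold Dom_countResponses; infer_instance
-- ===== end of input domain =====

-- B replaces A's scan of the fixed 26-letter alphabet (substring test per letter) by a per-group
-- set of the group's own characters intersected with the lowercase-letter set (objective: idiomatic).

-- string.ascii_lowercase
def alphaStr : String := "abcdefghijklmnopqrstuvwxyz"

-- ===== PORT A =====
def countResponses (groups : List String) : Int :=
  groups.foldl (fun totalCount group =>
    totalCount +
      alphaStr.toList.foldl (fun letterCount letter =>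
        if PySem.Str.isIn (String.ofList [letter]) group then letterCount + 1 else letterCount)
        (0 : Int))
    0

-- ===== PORT B =====
def countResponses_alt (groups : List String) : Int :=
  (groups.map (fun group =>
    PySem.Set.len (PySem.Set.inter (PySem.Set.ofList group.toList) (PySem.Set.ofList alphaStr.toList)))).sum

-- ===== PRECONDITION & SPEC =====
def Spec_countResponses (groups : List String) (out : Int) : Prop := out = countResponses_alt groups
instance (groups : List String) (out : Int) : Decidable (Spec_countResponses groups out) := by unfold Spec_countResponses; infer_instance

-- ===== CLAIM (what is proved, stated in full; the proofs are below) =====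
def Claim_equal_countResponses : Prop := ∀ (groups : List String), Dom_countResponses groups → Spec_countResponses groups (countResponses groups)

-- ===== LEMMAS AND PROOFS =====

theorem pv_singleton_infix {α : Type} (a : α) (l : List α) : [a] <:+: l ↔ a ∈ l := by
  constructor
  · intro h
    exact h.sublist.subset (List.mem_singleton_self a)
  · intro h
    obtain ⟨s, t, rfl⟩ := List.mem_iff_append.mp h
    exact ⟨s, t, by simp⟩

theorem pv_isIn_single (c : Char) (g : String) :
    PySem.Str.isIn (String.ofList [c]) g = decide (c ∈ g.toList) := by
  have h : PySem.Str.isIn (String.ofList [c]) g = true ↔ c ∈ g.toList := by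
    rw [PySem.Str.isIn_iff_infix]
    have : (String.ofList [c]).toList = [c] := by simp
    rw [this]
    exact pv_singleton_infix c g.toList
  by_cases hc : c ∈ g.toList
  · simp only [hc, decide_true]
    exact h.mpr hc
  · simp only [hc, decide_false]
    exact (Bool.not_eq_true _).mp (fun hh => hc (h.mp hh))

theorem pv_foldl_count {α : Type} (p : α → Bool) (l : List α) (n : Int) :
    l.foldl (fun k c => if p c then k + 1 else k) n = n + (l.countP p : Int) := by
  induction l generalizing n with
  | nil => simp
  | cons c t ih =>
    simp only [List.foldl_cons, List.countP_cons, ih]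
    by_cases h : p c = true <;> simp [h] <;> omega

theorem pv_inner_eq (g : String) :
    alphaStr.toList.foldl (fun letterCount letter =>
      if PySem.Str.isIn (String.ofList [letter]) g then letterCount + 1 else letterCount) (0 : Int)
    = PySem.Set.len (PySem.Set.inter (PySem.Set.ofList g.toList) (PySem.Set.ofList alphaStr.toList)) := by
  simp only [pv_isIn_single]
  rw [pv_foldl_count (fun c => decide (c ∈ g.toList)) alphaStr.toList 0, zero_add]
  unfold PySem.Set.len PySem.Set.inter
  congr 1
  rw [List.countP_eq_length_filter]
  have hA : (alphaStr.toList.filter (fun c => decide (c ∈ g.toList))).Nodup :=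
    (by decide : alphaStr.toList.Nodup).filter _
  have hB : ((PySem.Set.ofList g.toList).filter
      (fun x => (PySem.Set.ofList alphaStr.toList).contains x)).Nodup :=
    (PySem.Set.nodup_ofList g.toList).filter _
  rw [← List.toFinset_card_of_nodup hA, ← List.toFinset_card_of_nodup hB]
  congr 1
  ext c
  simp only [List.mem_toFinset, List.mem_filter, decide_eq_true_eq,
    PySem.Set.mem_ofList, PySem.Set.contains_eq_listContains, List.contains_iff_mem]
  tauto

theorem pv_foldl_add_sum {α : Type} (f : α → Int) (l : List α) (n : Int) :
    l.foldl (fun t g => t + f g) n = n + (l.map f).sum := by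
  induction l generalizing n with
  | nil => simp
  | cons c t ih => simp [List.foldl_cons, ih]; ring

-- ===== VERDICT (by name: the statement is the Claim_ definition above) =====
theorem countResponses_spec : Claim_equal_countResponses := by
  intro groups _
  unfold Spec_countResponses countResponses countResponses_alt
  rw [pv_foldl_add_sum
    (fun group => alphaStr.toList.foldl (fun letterCount letter =>
      if PySem.Str.isIn (String.ofList [letter]) group then letterCount + 1 else letterCount) (0 : Int))
    groups 0, zero_add]
  congr 1
  exact List.map_congr_left (fun g _ => pv_inner_eq g)
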